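-- pv_equiv track=rewrite | github.com/set990317/CODINGTEST_PRACTICE | DAY 001 ~ 100/DAY_041 [Programmers - Level_1 ] 이상한 문자 만들기.py | solution
-- ===== SOURCE A (Python) =====
-- def solution(s):
--     answer = ''
--     s = s.lower()
--     s = s.split(" ")
--
--     for i in range(len(s)) :
--         for j in range(len(s[i])) :
--             if j % 2 == 0:
--                 answer += s[i][j].upper()
--             else : answer += s[i][j]
--
--         if i != (len(s) - 1) :
--               answer += ' '
--     return answer
-- ===== SOURCE B (Python) =====
-- def solution(s):
--     out = []
--     idx = 0
--     for ch in s: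
--         if ch == ' ':
--             out.append(' ')
--             idx = 0
--         else:
--             out.append(ch.upper() if idx % 2 == 0 else ch.lower())
--             idx += 1
--     return ''.join(out)
-- ===== Notes on version B (the rewrite author's own statement) =====
-- stated objective: idiomatic
-- what changed: Replaced A's lowercase-then-split-then-nested-index-loops-and-rejoin with a single flat scan over the characters that keeps a per-word index counter reset on each space.
import Mathlib
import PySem

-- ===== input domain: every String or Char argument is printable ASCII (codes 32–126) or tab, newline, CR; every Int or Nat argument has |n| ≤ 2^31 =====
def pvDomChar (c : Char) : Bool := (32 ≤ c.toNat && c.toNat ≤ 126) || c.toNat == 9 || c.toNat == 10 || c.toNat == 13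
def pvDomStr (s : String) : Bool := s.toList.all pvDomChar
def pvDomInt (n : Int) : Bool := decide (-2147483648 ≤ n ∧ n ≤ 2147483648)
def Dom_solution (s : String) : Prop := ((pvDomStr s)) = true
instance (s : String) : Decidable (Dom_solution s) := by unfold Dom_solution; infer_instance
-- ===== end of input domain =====

-- B replaces A's split-into-words + nested index loops + rejoin by one flat scan with a
-- per-word index counter that resets on spaces (idiomatic single pass; same O(n) cost).

-- ===== PORT A =====
def solution (s : String) : String :=
  let t := PySem.Chars.lower s.toList
  let ws := PySem.Chars.splitOn t [' ']
  let answer := (PySem.List.pyRange 0 (ws.length : Int) 1).foldl (fun acc i =>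
      let w := PySem.List.pyGetD ws i []
      let acc2 := (PySem.List.pyRange 0 (w.length : Int) 1).foldl (fun a j =>
          if PySem.Int.mod j 2 = 0 then a ++ [PySem.Chars.upperChar (PySem.List.pyGetD w j ' ')]
          else a ++ [PySem.List.pyGetD w j ' ']) acc
      if i ≠ (ws.length : Int) - 1 then acc2 ++ [' '] else acc2) []
  String.mk answer

-- ===== PORT B =====
def solution_alt (s : String) : String :=
  let r := s.toList.foldl (fun (st : List Char × Nat) c =>
      if c = ' ' then (st.1 ++ [' '], 0)
      else (st.1 ++ [if st.2 % 2 = 0 then PySem.Chars.upperChar c else PySem.Chars.lowerChar c],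
            st.2 + 1)) ([], 0)
  String.mk r.1

-- ===== PRECONDITION & SPEC =====
def Spec_solution (s : String) (out : String) : Prop := out = solution_alt s
instance (s : String) (out : String) : Decidable (Spec_solution s out) := by unfold Spec_solution; infer_instance

-- ===== CLAIM (what is proved, stated in full; the proofs are below) =====
def Claim_equal_solution : Prop := ∀ (s : String), Dom_solution s → Spec_solution s (solution s)

-- ===== LEMMAS AND PROOFS =====

-- what B computes: one pass, counter k resets on spaces
def bCore (k : Nat) : List Char → List Char
  | [] => []
  | c :: t => if c = ' ' then ' ' :: bCore 0 t
              else (if k % 2 = 0 then PySem.Chars.upperChar c else PySem.Chars.lowerChar c) :: bCore (k + 1) t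

-- A's inner loop on one (already lowered) word, starting at index k
def procA (k : Nat) : List Char → List Char
  | [] => []
  | c :: t => (if k % 2 = 0 then PySem.Chars.upperChar c else c) :: procA (k + 1) t

-- A's outer loop on the word list (space between words, first word from offset k)
def aJoin (k : Nat) : List (List Char) → List Char
  | [] => []
  | [w] => procA k w
  | w :: w2 :: ws => procA k w ++ ' ' :: aJoin 0 (w2 :: ws)

-- reference form of split(" ") with the pending-word accumulator
def mySplit (pre : List Char) : List Char → List (List Char)
  | [] => [pre]
  | c :: t => if c = ' ' then pre :: mySplit [] t else mySplit (pre ++ [c]) t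

theorem char_le_iff (c d : Char) : (c ≤ d) ↔ c.toNat ≤ d.toNat :=
  ⟨fun h => Fin.mk_le_mk.mp h, fun h => Fin.mk_le_mk.mpr h⟩

theorem toNat_ofNat_small (n : Nat) (h : n < 55296) : (Char.ofNat n).toNat = n := by
  rw [Char.ofNat, dif_pos (Or.inl h)]
  simp [Char.ofNatAux, Char.toNat]

theorem upper_lower (c : Char) :
    PySem.Chars.upperChar (PySem.Chars.lowerChar c) = PySem.Chars.upperChar c := by
  unfold PySem.Chars.upperChar PySem.Chars.lowerChar PySem.Chars.islower PySem.Chars.isupper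
  have ha : Char.toNat 'a' = 97 := rfl
  have hz : Char.toNat 'z' = 122 := rfl
  have hA : Char.toNat 'A' = 65 := rfl
  have hZ : Char.toNat 'Z' = 90 := rfl
  by_cases hu : 'A' ≤ c ∧ c ≤ 'Z'
  · have h65 : 65 ≤ c.toNat := hA ▸ (char_le_iff _ _).mp hu.1
    have h90 : c.toNat ≤ 90 := hZ ▸ (char_le_iff _ _).mp hu.2
    have ht : (Char.ofNat (c.toNat + 32)).toNat = c.toNat + 32 := toNat_ofNat_small _ (by omega)
    have hinner : (if (decide ('A' ≤ c) && decide (c ≤ 'Z')) = true then Char.ofNat (c.toNat + 32) else c) = Char.ofNat (c.toNat + 32) :=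
      if_pos (by simp [hu.1, hu.2])
    rw [hinner]
    rw [if_pos (show (decide ('a' ≤ Char.ofNat (c.toNat + 32)) && decide (Char.ofNat (c.toNat + 32) ≤ 'z')) = true by
      simp only [Bool.and_eq_true, decide_eq_true_eq]
      exact ⟨(char_le_iff _ _).mpr (by rw [ht, ha]; omega),
             (char_le_iff _ _).mpr (by rw [ht, hz]; omega)⟩)]
    rw [ht, Nat.add_sub_cancel, Char.ofNat_toNat]
    rw [if_neg (show ¬ ((decide ('a' ≤ c) && decide (c ≤ 'z')) = true) by
      simp only [Bool.and_eq_true, decide_eq_true_eq]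
      rintro ⟨h1, _⟩
      have := ha ▸ (char_le_iff _ _).mp h1
      omega)]
  · rw [if_neg (show ¬ ((decide ('A' ≤ c) && decide (c ≤ 'Z')) = true) by
      simp only [Bool.and_eq_true, decide_eq_true_eq]; exact hu)]

theorem lowerChar_eq_space_iff (c : Char) : PySem.Chars.lowerChar c = ' ' ↔ c = ' ' := by
  unfold PySem.Chars.lowerChar PySem.Chars.isupper
  have hA : Char.toNat 'A' = 65 := rfl
  have hZ : Char.toNat 'Z' = 90 := rfl
  have hsp : Char.toNat ' ' = 32 := rfl
  by_cases hu : 'A' ≤ c ∧ c ≤ 'Z'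
  · have h65 : 65 ≤ c.toNat := hA ▸ (char_le_iff _ _).mp hu.1
    have h90 : c.toNat ≤ 90 := hZ ▸ (char_le_iff _ _).mp hu.2
    have ht : (Char.ofNat (c.toNat + 32)).toNat = c.toNat + 32 := toNat_ofNat_small _ (by omega)
    have hinner : (if (decide ('A' ≤ c) && decide (c ≤ 'Z')) = true then Char.ofNat (c.toNat + 32) else c) = Char.ofNat (c.toNat + 32) :=
      if_pos (by simp [hu.1, hu.2])
    rw [hinner]
    constructor
    · intro h
      have h2 := congrArg Char.toNat h
      rw [ht, hsp] at h2
      omega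
    · intro h
      have h2 := congrArg Char.toNat h
      rw [hsp] at h2
      omega
  · rw [if_neg (show ¬ ((decide ('A' ≤ c) && decide (c ≤ 'Z')) = true) by
      simp only [Bool.and_eq_true, decide_eq_true_eq]; exact hu)]

theorem mySplit_ne_nil (l : List Char) (pre : List Char) : mySplit pre l ≠ [] := by
  induction l generalizing pre with
  | nil => simp [mySplit]
  | cons c t ih => by_cases h : c = ' ' <;> simp [mySplit, h, ih]

theorem aJoin_cons (k : Nat) (w : List Char) (ws : List (List Char)) (h : ws ≠ []) :
    aJoin k (w :: ws) = procA k w ++ ' ' :: aJoin 0 ws := by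
  cases ws with
  | nil => exact absurd rfl h
  | cons w2 t => rfl

theorem procA_append (k : Nat) (pre : List Char) (x : Char) :
    procA k (pre ++ [x]) = procA k pre ++ [if (k + pre.length) % 2 = 0 then PySem.Chars.upperChar x else x] := by
  induction pre generalizing k with
  | nil => simp [procA]
  | cons c t ih =>
      simp only [List.cons_append, procA, ih (k + 1), List.length_cons]
      have : k + 1 + t.length = k + (t.length + 1) := by omega
      rw [this]
      rfl


-- main bridge: A's split-process-join equals B's flat scan
theorem main_bridge (l pre : List Char) (k : Nat) :
    aJoin k (mySplit pre (PySem.Chars.lower l)) = procA k pre ++ bCore (k + pre.length) l := by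
  induction l generalizing pre k with
  | nil => simp [PySem.Chars.lower, mySplit, aJoin, bCore]
  | cons c t ih =>
      by_cases h : c = ' '
      · subst h
        have hl : PySem.Chars.lowerChar ' ' = ' ' := by decide
        simp only [PySem.Chars.lower, List.map_cons, hl, mySplit, reduceIte]
        rw [aJoin_cons k pre _ (mySplit_ne_nil _ _)]
        have := ih [] 0
        simp only [procA, List.nil_append, List.length_nil, Nat.add_zero] at this
        rw [show (PySem.Chars.lower t) = List.map PySem.Chars.lowerChar t from rfl] at this
        simp [bCore, this]
      · have hl : PySem.Chars.lowerChar c ≠ ' ' := fun hc => h ((lowerChar_eq_space_iff c).mp hc)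
        simp only [PySem.Chars.lower, List.map_cons, mySplit, if_neg hl]
        rw [show List.map PySem.Chars.lowerChar t = PySem.Chars.lower t from rfl]
        rw [ih (pre ++ [PySem.Chars.lowerChar c]) k]
        rw [procA_append]
        simp only [bCore, if_neg h, upper_lower, List.length_append, List.length_cons,
          List.length_nil, Nat.zero_add]
        by_cases hp : (k + pre.length) % 2 = 0
        · simp only [hp, if_pos rfl, reduceIte]
          rw [show k + (pre.length + 1) = k + pre.length + 1 from by omega]
          simp
        · simp only [hp, if_neg hp, reduceIte]
          rw [show k + (pre.length + 1) = k + pre.length + 1 from by omega]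
          simp

theorem go_eq (fuel : Nat) (l cur : List Char) (acc : List (List Char)) (h : l.length < fuel) :
    PySem.Chars.splitOn.go [' '] fuel l cur acc = acc.reverse ++ mySplit cur.reverse l := by
  induction fuel generalizing l cur acc with
  | zero => omega
  | succ f ih =>
      cases l with
      | nil => simp [PySem.Chars.splitOn.go, mySplit]
      | cons c rest =>
          by_cases hc : c = ' '
          · subst hc
            rw [show PySem.Chars.splitOn.go [' '] (f+1) (' ' :: rest) cur acc
                  = PySem.Chars.splitOn.go [' '] f rest [] (cur.reverse :: acc) from by
              simp [PySem.Chars.splitOn.go, List.isPrefixOf]]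
            rw [ih rest [] (cur.reverse :: acc) (by simpa using Nat.lt_of_succ_lt_succ h)]
            simp [mySplit]
          · rw [show PySem.Chars.splitOn.go [' '] (f+1) (c :: rest) cur acc
                  = PySem.Chars.splitOn.go [' '] f rest (c :: cur) acc from by
              simp only [PySem.Chars.splitOn.go, List.isPrefixOf]
              rw [if_neg (by simp [Bool.and_eq_true]; intro h'; exact absurd h'.symm hc)]]
            rw [ih rest (c :: cur) acc (by simpa using Nat.lt_of_succ_lt_succ h)]
            simp [mySplit, hc]

theorem splitOn_eq (l : List Char) : PySem.Chars.splitOn l [' '] = mySplit [] l := by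
  unfold PySem.Chars.splitOn
  rw [go_eq (l.length + 1) l [] [] (by omega)]
  simp

-- A's inner loop from index j equals procA j on the rest of the word
theorem innerL (w : List Char) (j : Nat) (hj : j ≤ w.length) (acc : List Char) :
    (PySem.List.pyRange (j : Int) (w.length : Int) 1).foldl (fun a j =>
          if PySem.Int.mod j 2 = 0 then a ++ [PySem.Chars.upperChar (PySem.List.pyGetD w j ' ')]
          else a ++ [PySem.List.pyGetD w j ' ']) acc
      = acc ++ procA j (w.drop j) := by
  induction hn : w.length - j generalizing j acc with
  | zero =>
      have hj' : j = w.length := by omega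
      subst hj'
      rw [PySem.List.pyRange_one_eq_nil (le_refl _)]
      simp [procA]
  | succ n ih =>
      have hjl : j < w.length := by omega
      rw [PySem.List.pyRange_one_cons (by exact_mod_cast hjl)]
      simp only [List.foldl_cons]
      rw [show ((j : Int) + 1) = ((j + 1 : Nat) : Int) from by push_cast; ring]
      rw [ih (j + 1) (by omega) _ (by omega)]
      rw [List.drop_eq_getElem_cons hjl]
      simp only [procA, PySem.List.pyGetD_natCast]
      rw [show PySem.Int.mod (j : Int) 2 = ((j % 2 : Nat) : Int) from by
        exact_mod_cast PySem.Int.mod_natCast j 2]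
      by_cases hp : j % 2 = 0
      · simp [hp, List.getElem?_eq_getElem hjl]
      · rw [if_neg (by exact_mod_cast hp)]
        simp [hp, List.getElem?_eq_getElem hjl]

theorem innerL0 (w : List Char) (acc : List Char) :
    (PySem.List.pyRange 0 (w.length : Int) 1).foldl (fun a j =>
          if PySem.Int.mod j 2 = 0 then a ++ [PySem.Chars.upperChar (PySem.List.pyGetD w j ' ')]
          else a ++ [PySem.List.pyGetD w j ' ']) acc
      = acc ++ procA 0 w := by
  have h := innerL w 0 (Nat.zero_le _) acc
  rw [Nat.cast_zero, List.drop_zero] at h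
  exact h

-- A's outer loop from index i equals aJoin 0 on the remaining words
theorem outerL (ws : List (List Char)) (i : Nat) (hi : i ≤ ws.length) (acc : List Char) :
    (PySem.List.pyRange (i : Int) (ws.length : Int) 1).foldl (fun acc i =>
      let w := PySem.List.pyGetD ws i []
      let acc2 := (PySem.List.pyRange 0 (w.length : Int) 1).foldl (fun a j =>
          if PySem.Int.mod j 2 = 0 then a ++ [PySem.Chars.upperChar (PySem.List.pyGetD w j ' ')]
          else a ++ [PySem.List.pyGetD w j ' ']) acc
      if i ≠ (ws.length : Int) - 1 then acc2 ++ [' '] else acc2) acc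
      = acc ++ aJoin 0 (ws.drop i) := by
  induction hn : ws.length - i generalizing i acc with
  | zero =>
      have hi' : i = ws.length := by omega
      subst hi'
      rw [PySem.List.pyRange_one_eq_nil (le_refl _)]
      simp [aJoin]
  | succ n ih =>
      have hil : i < ws.length := by omega
      rw [PySem.List.pyRange_one_cons (by exact_mod_cast hil)]
      simp only [List.foldl_cons, PySem.List.pyGetD_natCast, List.getD_eq_getElem ws [] hil]
      rw [innerL0 ws[i] acc]
      rw [show ((i : Int) + 1) = ((i + 1 : Nat) : Int) from by push_cast; ring]
      rw [List.drop_eq_getElem_cons hil]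
      by_cases hlast : i + 1 = ws.length
      · have : ¬ ((i : Int) ≠ (ws.length : Int) - 1) := by push_neg; omega
        rw [if_neg this]
        rw [ih (i + 1) (by omega) _ (by omega)]
        have : ws.drop (i + 1) = [] := by
          apply List.drop_eq_nil_of_le; omega
        rw [this]
        simp [aJoin]
      · have : ((i : Int) ≠ (ws.length : Int) - 1) := by
          intro hc; omega
        rw [if_pos this]
        rw [ih (i + 1) (by omega) _ (by omega)]
        rw [aJoin_cons 0 _ _ (by
          intro hc
          have := congrArg List.length hc
          simp at this; omega)]
        simp

theorem outerL0 (ws : List (List Char)) :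
    (PySem.List.pyRange 0 (ws.length : Int) 1).foldl (fun acc i =>
      let w := PySem.List.pyGetD ws i []
      let acc2 := (PySem.List.pyRange 0 (w.length : Int) 1).foldl (fun a j =>
          if PySem.Int.mod j 2 = 0 then a ++ [PySem.Chars.upperChar (PySem.List.pyGetD w j ' ')]
          else a ++ [PySem.List.pyGetD w j ' ']) acc
      if i ≠ (ws.length : Int) - 1 then acc2 ++ [' '] else acc2) []
      = aJoin 0 ws := by
  have h := outerL ws 0 (Nat.zero_le _) []
  rw [Nat.cast_zero, List.drop_zero, List.nil_append] at h
  exact h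

-- B's fold accumulates acc ++ bCore k cs
theorem bFold (cs : List Char) (k : Nat) (acc : List Char) :
    (cs.foldl (fun (st : List Char × Nat) c =>
      if c = ' ' then (st.1 ++ [' '], 0)
      else (st.1 ++ [if st.2 % 2 = 0 then PySem.Chars.upperChar c else PySem.Chars.lowerChar c],
            st.2 + 1)) (acc, k)).1 = acc ++ bCore k cs := by
  induction cs generalizing k acc with
  | nil => simp [bCore]
  | cons c t ih =>
      by_cases h : c = ' '
      · subst h
        simp only [List.foldl_cons, reduceIte, ih, bCore]
        simp
      · simp only [List.foldl_cons, if_neg h, ih, bCore]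
        by_cases hp : k % 2 = 0 <;> simp [hp]

-- ===== VERDICT (by name: the statement is the Claim_ definition above) =====
theorem solution_spec : Claim_equal_solution := by
  intro s _
  unfold Spec_solution solution solution_alt
  simp only []
  rw [splitOn_eq]
  rw [outerL0 (mySplit [] (PySem.Chars.lower s.toList))]
  rw [show aJoin 0 (mySplit [] (PySem.Chars.lower s.toList)) = procA 0 [] ++ bCore (0 + [].length) s.toList from main_bridge s.toList [] 0]
  rw [bFold s.toList 0 []]
  simp [procA]
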